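-- pv_equiv track=rewrite | github.com/wachawich/SPAI-DS-Cleaning-data-level1 | final_ds_hackathon.py | delete_dash
-- ===== SOURCE A (Python) =====
-- def delete_dash(string):
--   count = 0
--   j = 0
--   dash = 0
--   for i in string:
--     if i == ' ':
--       count = 1
--     if count == 1:
--       j += 1
--     if i == '-':
--       dash += 1
--   if j <= 2 or dash >= 1:
--     return string.replace(' -', '').replace('.','')
--   else : return string.replace(' - ', ' ').replace(' 1 ', ' ')
-- ===== SOURCE B (Python) =====
-- def delete_dash(string):
--     if '-' in string:
--         return string.replace(' -', '').replace('.', '')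
--     if string.find(' ') == -1 or len(string) - string.find(' ') <= 2:
--         return string.replace('.', '')
--     return string.replace(' 1 ', ' ')
-- ===== Notes on version B (the rewrite author's own statement) =====
-- stated objective: simpler
-- what changed: Replaced the character-by-character counter loop with a three-way case split on dash membership and the first-space index, dropping the replace calls that are provably no-ops in the dash-free branches.
import Mathlib
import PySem

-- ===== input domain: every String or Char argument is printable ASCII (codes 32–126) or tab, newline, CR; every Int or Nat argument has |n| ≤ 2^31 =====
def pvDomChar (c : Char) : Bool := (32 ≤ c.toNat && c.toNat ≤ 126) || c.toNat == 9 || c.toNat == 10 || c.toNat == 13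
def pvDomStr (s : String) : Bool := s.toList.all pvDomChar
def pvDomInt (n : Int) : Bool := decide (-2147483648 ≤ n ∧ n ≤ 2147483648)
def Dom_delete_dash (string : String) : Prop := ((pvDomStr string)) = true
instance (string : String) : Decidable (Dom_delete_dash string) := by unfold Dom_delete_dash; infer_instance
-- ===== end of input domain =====

-- B is simpler: a three-way case split (dash present / no space or short tail / otherwise) replaces
-- A's char-by-char counter loop; the dash-free branches drop the replace calls that are no-ops there.

-- ===== PORT A =====
-- A's loop body and loop, named so the lemmas below can speak about them
def ddStep (s : Int × Int × Int) (i : Char) : Int × Int × Int :=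
  let count := if i = ' ' then 1 else s.1
  let j := if count = 1 then s.2.1 + 1 else s.2.1
  let dash := if i = '-' then s.2.2 + 1 else s.2.2
  (count, j, dash)

def ddState (cs : List Char) : Int × Int × Int := cs.foldl ddStep (0, 0, 0)

def delete_dash (string : String) : String :=
  if (ddState string.toList).2.1 ≤ 2 ∨ (ddState string.toList).2.2 ≥ 1 then
    PySem.Str.replace (PySem.Str.replace string " -" "") "." ""
  else
    PySem.Str.replace (PySem.Str.replace string " - " " ") " 1 " " "

-- ===== PORT B =====
def delete_dash_alt (string : String) : String :=
  if PySem.Str.isIn "-" string then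
    PySem.Str.replace (PySem.Str.replace string " -" "") "." ""
  else
    if PySem.Str.find string " " = -1 ∨ PySem.Str.len string - PySem.Str.find string " " ≤ 2 then
      PySem.Str.replace string "." ""
    else
      PySem.Str.replace string " 1 " " "

-- ===== PRECONDITION & SPEC =====
def Spec_delete_dash (string : String) (out : String) : Prop := out = delete_dash_alt string
instance (string : String) (out : String) : Decidable (Spec_delete_dash string out) := by unfold Spec_delete_dash; infer_instance

-- ===== CLAIM (what is proved, stated in full; the proofs are below) =====
def Claim_equal_delete_dash : Prop := ∀ (string : String), Dom_delete_dash string → Spec_delete_dash string (delete_dash string)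

-- ===== LEMMAS AND PROOFS =====

-- index of the first occurrence of a character, as a spec object
def firstIdx? (a : Char) : List Char → Option Nat
  | [] => none
  | c :: t => if c = a then some 0 else (firstIdx? a t).map (· + 1)

lemma firstIdx?_eq_none_iff (a : Char) (l : List Char) : firstIdx? a l = none ↔ a ∉ l := by
  induction l with
  | nil => simp [firstIdx?]
  | cons c t ih =>
    by_cases h : c = a <;> simp [firstIdx?, h, ih] <;> tauto

lemma foldl_ddStep_one (cs : List Char) : ∀ (j d : Int),
    cs.foldl ddStep (1, j, d) = (1, j + cs.length, d + cs.count '-') := by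
  induction cs with
  | nil => intro j d; simp
  | cons c t ih =>
    intro j d
    have hstep : ddStep (1, j, d) c = (1, j + 1, if c = '-' then d + 1 else d) := by
      by_cases h : c = '-' <;> simp [ddStep, h]
    rw [List.foldl_cons, hstep, ih]
    by_cases h : c = '-' <;> simp [h, List.count_cons, Prod.ext_iff] <;> push_cast <;> omega

lemma foldl_ddStep_zero (cs : List Char) : ∀ (d : Int),
    cs.foldl ddStep (0, 0, d) =
      match firstIdx? ' ' cs with
      | none => (0, 0, d + cs.count '-')
      | some k => (1, (cs.length : Int) - k, d + cs.count '-') := by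
  induction cs with
  | nil => intro d; simp [firstIdx?]
  | cons c t ih =>
    intro d
    by_cases hsp : c = ' '
    · subst hsp
      have hne : ((' ' : Char) = '-') = False := by simp
      have hstep : ddStep (0, 0, d) ' ' = (1, 1, d) := by simp [ddStep, hne]
      have hcnt : (' ' :: t).count '-' = t.count '-' := by
        simp [List.count_cons]
      rw [List.foldl_cons, hstep, foldl_ddStep_one]
      simp only [firstIdx?, if_pos rfl, hcnt]
      simp [Prod.ext_iff] <;> push_cast <;> omega
    · have hstep : ddStep (0, 0, d) c = (0, 0, if c = '-' then d + 1 else d) := by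
        by_cases h : c = '-' <;> simp [ddStep, hsp, h]
      rw [List.foldl_cons, hstep, ih]
      have hcnt : ((c :: t).count '-' : Int) = (t.count '-' : Int) + (if c = '-' then 1 else 0) := by
        by_cases h : c = '-' <;> simp [List.count_cons, h]
      cases hfi : firstIdx? ' ' t with
      | none =>
        simp only [firstIdx?, hsp, if_neg hsp, hfi, Option.map_none]
        by_cases h : c = '-' <;> simp [h, Prod.ext_iff, List.count_cons] <;> push_cast <;> omega
      | some k =>
        simp only [firstIdx?, if_neg hsp, hfi, Option.map_some]
        by_cases h : c = '-' <;> simp [h, Prod.ext_iff, List.count_cons] <;> push_cast <;> omega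

-- singleton infix is membership
lemma singleton_infix_iff (a : Char) (l : List Char) : [a] <:+: l ↔ a ∈ l := by
  constructor
  · intro h; exact h.subset (by simp)
  · intro h
    rcases List.append_of_mem h with ⟨s, t, rfl⟩
    exact ⟨s, t, by simp⟩

lemma find_singleton (a : Char) (cs : List Char) :
    PySem.Chars.find cs [a] =
      match firstIdx? a cs with
      | none => -1
      | some k => (k : Int) := by
  induction cs with
  | nil =>
    have h : ¬ ([a] <:+: ([] : List Char)) := by simp [singleton_infix_iff]
    simp [firstIdx?, (PySem.Chars.find_eq_neg_one_iff ([] : List Char) [a]).2 h]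
  | cons c t ih =>
    by_cases h : c = a
    · subst h
      have hmem : c ∈ c :: t := by simp
      have hnn : (0:Int) ≤ PySem.Chars.find (c :: t) [c] :=
        (PySem.Chars.find_nonneg_iff _ _).2 ((singleton_infix_iff _ _).2 hmem)
      have hspec := PySem.Chars.find_spec (s := c :: t) (sub := [c]) hnn
      have h0 : (PySem.Chars.find (c :: t) [c]).toNat = 0 := by
        by_contra hne
        exact (hspec.2 0 (Nat.pos_of_ne_zero hne)) ⟨t, rfl⟩
      have hfind : PySem.Chars.find (c :: t) [c] = 0 := by omega
      simp [firstIdx?, hfind]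
    · by_cases hm : a ∈ t
      · have hmem : a ∈ c :: t := by simp [hm]
        have hnn : (0:Int) ≤ PySem.Chars.find (c :: t) [a] :=
          (PySem.Chars.find_nonneg_iff _ _).2 ((singleton_infix_iff _ _).2 hmem)
        have hnn' : (0:Int) ≤ PySem.Chars.find t [a] :=
          (PySem.Chars.find_nonneg_iff _ _).2 ((singleton_infix_iff _ _).2 hm)
        have hspec := PySem.Chars.find_spec (s := c :: t) (sub := [a]) hnn
        have hspec' := PySem.Chars.find_spec (s := t) (sub := [a]) hnn'
        obtain ⟨n, hn⟩ : ∃ n : Nat, PySem.Chars.find (c :: t) [a] = n :=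
          ⟨_, (Int.toNat_of_nonneg hnn).symm⟩
        obtain ⟨m, hm2⟩ : ∃ m : Nat, PySem.Chars.find t [a] = m :=
          ⟨_, (Int.toNat_of_nonneg hnn').symm⟩
        rw [hn] at hspec
        rw [hm2] at hspec'
        simp only [Int.toNat_natCast] at hspec hspec'
        have hnpos : n ≠ 0 := by
          intro h0
          rw [h0] at hspec
          rcases hspec.1 with ⟨r, hr⟩
          simp only [List.drop_zero, List.cons_append, List.nil_append, List.cons.injEq] at hr
          exact h hr.1.symm
        obtain ⟨f', rfl⟩ : ∃ f', n = f' + 1 := ⟨n - 1, by omega⟩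
        have hdrop : (c :: t).drop (f' + 1) = t.drop f' := List.drop_succ_cons ..
        have hle1 : m ≤ f' := by
          by_contra hlt
          exact hspec'.2 f' (by omega) (by rw [← hdrop]; exact hspec.1)
        have hle2 : f' + 1 ≤ m + 1 := by
          by_contra hlt
          exact hspec.2 (m + 1) (by omega) (by rw [List.drop_succ_cons]; exact hspec'.1)
        cases hfi : firstIdx? a t with
        | none => exact absurd ((firstIdx?_eq_none_iff a t).1 hfi) (by simp [hm])
        | some k =>
          have hkm : (k : Int) = (m : Int) := by
            have := ih; rw [hm2, hfi] at this; exact this.symm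
          simp only [firstIdx?, if_neg h, hfi, Option.map_some, hn]
          have : f' + 1 = k + 1 := by omega
          exact_mod_cast congrArg (Nat.cast (R := Int)) this
      · have hnm : a ∉ c :: t := by
          intro hx; rcases List.mem_cons.1 hx with hx | hx
          · exact h hx.symm
          · exact hm hx
        have hinf : ¬ ([a] <:+: (c :: t)) := by simp [singleton_infix_iff, hnm]
        have hfi : firstIdx? a t = none := (firstIdx?_eq_none_iff a t).2 hm
        simp [firstIdx?, h, hfi, (PySem.Chars.find_eq_neg_one_iff (c :: t) [a]).2 hinf]

-- replace is a no-op when the pattern never occurs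
lemma replace_go_no_occ (old new : List Char) :
    ∀ (l : List Char) (fuel : Nat) (acc : List Char), l.length ≤ fuel →
      (∀ j, ¬ old <+: l.drop j) →
      PySem.Chars.replace.go old new fuel l acc = acc.reverse ++ l := by
  intro l
  induction l with
  | nil =>
    intro fuel acc _ _
    cases fuel <;> simp [PySem.Chars.replace.go]
  | cons c t ih =>
    intro fuel acc hlen hno
    cases fuel with
    | zero => simp at hlen
    | succ f =>
      have hnp : old.isPrefixOf (c :: t) = false := by
        rw [Bool.eq_false_iff, Ne, List.isPrefixOf_iff_prefix]
        simpa using hno 0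
      rw [PySem.Chars.replace.go]
      simp only [hnp, Bool.false_eq_true, if_false]
      rw [ih f (c :: acc) (by simpa using hlen) (fun j => by simpa using hno (j + 1))]
      simp

lemma replace_no_occ (cs old new : List Char) (a : Char) (ha : a ∈ old) (hna : a ∉ cs) :
    PySem.Chars.replace cs old new = cs := by
  have hold : old ≠ [] := by rintro rfl; simp at ha
  have hninf : ¬ old <:+: cs := fun h => hna (h.subset ha)
  have hno : ∀ j, ¬ old <+: cs.drop j := fun j hp =>
    hninf (hp.isInfix.trans (List.drop_suffix j cs).isInfix)
  unfold PySem.Chars.replace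
  rw [if_neg (by simp [List.isEmpty_iff, hold])]
  rw [replace_go_no_occ old new cs cs.length [] le_rfl hno]
  simp

lemma str_replace_no_occ (s old new : String) (a : Char) (ha : a ∈ old.toList)
    (hna : a ∉ s.toList) : PySem.Str.replace s old new = s := by
  unfold PySem.Str.replace
  rw [replace_no_occ s.toList old.toList new.toList a ha hna]
  simp

-- ===== VERDICT (by name: the statement is the Claim_ definition above) =====
theorem delete_dash_spec : Claim_equal_delete_dash := by
  intro s _
  unfold Spec_delete_dash delete_dash delete_dash_alt
  have hdash : ("-" : String).toList = ['-'] := by decide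
  have hsp : (" " : String).toList = [' '] := by decide
  have hfold : ddState s.toList =
      match firstIdx? ' ' s.toList with
      | none => (0, 0, (0:Int) + s.toList.count '-')
      | some k => (1, (s.toList.length : Int) - k, (0:Int) + s.toList.count '-') :=
    foldl_ddStep_zero s.toList 0
  have hlen3 : (s.toList.length : Int) = (s.length : Int) := by simp
  by_cases hm : '-' ∈ s.toList
  · -- dash present: both take the first branch
    have hIn : PySem.Str.isIn "-" s = true := by
      rw [PySem.Str.isIn_iff_infix, hdash, singleton_infix_iff]; exact hm
    have hcnt : (1:Int) ≤ (s.toList.count '-' : Int) := by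
      exact_mod_cast List.count_pos_iff.mpr hm
    have hA : (ddState s.toList).2.1 ≤ 2 ∨ (ddState s.toList).2.2 ≥ 1 := by
      cases hfi : firstIdx? ' ' s.toList with
      | none => rw [hfold, hfi]; right; simpa using hcnt
      | some k => rw [hfold, hfi]; right; simpa using hcnt
    rw [hIn, if_pos hA]
    simp
  · -- no dash
    have hcnt0 : s.toList.count '-' = 0 := List.count_eq_zero.mpr hm
    have hIn : PySem.Str.isIn "-" s = false := by
      rw [Bool.eq_false_iff, Ne, PySem.Str.isIn_iff_infix, hdash, singleton_infix_iff]
      exact hm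
    have hNoDash1 : PySem.Str.replace s " -" "" = s :=
      str_replace_no_occ s " -" "" '-' (by decide) hm
    have hNoDash2 : PySem.Str.replace s " - " " " = s :=
      str_replace_no_occ s " - " " " '-' (by decide) hm
    have hfind : PySem.Str.find s " " =
        match firstIdx? ' ' s.toList with
        | none => -1
        | some k => (k : Int) := by
      rw [PySem.Str.find_eq, hsp]; exact find_singleton ' ' s.toList
    have hlen : PySem.Str.len s = (s.length : Int) := by simp
    cases hfi : firstIdx? ' ' s.toList with
    | none =>
      rw [hfi] at hfold hfind
      have hA : (ddState s.toList).2.1 ≤ 2 ∨ (ddState s.toList).2.2 ≥ 1 := by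
        rw [hfold]; left; norm_num
      rw [hIn, if_pos hA, hfind, hNoDash1]
      simp
    | some k =>
      rw [hfi] at hfold hfind
      by_cases hk : (s.toList.length : Int) - k ≤ 2
      · have hA : (ddState s.toList).2.1 ≤ 2 ∨ (ddState s.toList).2.2 ≥ 1 := by
          rw [hfold]; left; simpa using hk
        have hB : (k : Int) = -1 ∨ (s.length : Int) - (k : Int) ≤ 2 := by omega
        rw [hIn, if_pos hA, hfind, hlen, if_pos hB, hNoDash1]
        simp
      · have hA : ¬ ((ddState s.toList).2.1 ≤ 2 ∨ (ddState s.toList).2.2 ≥ 1) := by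
          rw [hfold]
          simp [hcnt0]
          omega
        have hB : ¬ ((k : Int) = -1 ∨ (s.length : Int) - (k : Int) ≤ 2) := by omega
        rw [hIn, if_neg hA, hfind, hlen, if_neg hB, hNoDash2]
        simp
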